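-- pv_equiv track=rewrite | github.com/umr-ds/OFC4DNA | overhead_experiment.py | calc_homopolymer
-- ===== SOURCE A (Python) =====
-- def calc_homopolymer(fasta, hp_len=2):
--     hp_content = []
--     for key, value in fasta.items():
--         row_hp = 0
--         row_hp += value.count("A" * hp_len)
--         row_hp += value.count("T" * hp_len)
--         row_hp += value.count("G" * hp_len)
--         row_hp += value.count("C" * hp_len)
--         hp_content.append(row_hp)
--     return hp_content
-- ===== SOURCE B (Python) =====
-- def calc_homopolymer(fasta, hp_len=2):
--     # Single pass per sequence: group into maximal runs, add run_len // hp_len for A/T/G/C runs.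
--     result = []
--     for value in fasta.values():
--         total = 0
--         rest = value
--         while rest:
--             ch = rest[0]
--             run = 1
--             while run < len(rest) and rest[run] == ch:
--                 run += 1
--             if ch in "ATGC":
--                 total += run // hp_len
--             rest = rest[run:]
--         result.append(total)
--     return result
-- ===== Notes on version B (the rewrite author's own statement) =====
-- stated objective: alternative
-- what changed: Replaces the four independent str.count substring scans per sequence with one run-length grouping pass that adds run_length // hp_len for each maximal A/T/G/C run.
-- outside the precondition, e.g. on calc_homopolymer({'k': 'AT'}, 0): A returns [12], B raises ZeroDivisionError; on calc_homopolymer({'k': 'AT'}, -1): A returns [12], B returns [-2]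
import Mathlib
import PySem

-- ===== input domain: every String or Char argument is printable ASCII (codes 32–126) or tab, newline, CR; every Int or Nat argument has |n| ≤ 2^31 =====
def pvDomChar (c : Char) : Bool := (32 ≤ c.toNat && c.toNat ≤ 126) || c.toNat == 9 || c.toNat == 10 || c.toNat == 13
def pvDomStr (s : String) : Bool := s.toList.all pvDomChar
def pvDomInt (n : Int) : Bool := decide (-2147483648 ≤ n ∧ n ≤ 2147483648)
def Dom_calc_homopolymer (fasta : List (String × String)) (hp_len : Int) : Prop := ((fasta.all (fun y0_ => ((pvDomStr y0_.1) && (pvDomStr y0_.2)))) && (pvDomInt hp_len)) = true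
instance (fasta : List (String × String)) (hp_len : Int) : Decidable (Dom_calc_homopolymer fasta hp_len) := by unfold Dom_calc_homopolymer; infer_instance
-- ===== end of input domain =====

-- B replaces the four independent substring-count scans per sequence with one run-length grouping pass (alternative decomposition, same cost).

-- ===== PORT A =====
def calc_homopolymer (fasta : List (String × String)) (hp_len : Int) : List Int :=
  fasta.foldl (fun hp_content kv =>
    let value := kv.2.toList
    let row_hp : Int := 0
    let row_hp := row_hp + (PySem.Chars.count value (PySem.List.pyRepeat ['A'] hp_len) : Int)
    let row_hp := row_hp + (PySem.Chars.count value (PySem.List.pyRepeat ['T'] hp_len) : Int)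
    let row_hp := row_hp + (PySem.Chars.count value (PySem.List.pyRepeat ['G'] hp_len) : Int)
    let row_hp := row_hp + (PySem.Chars.count value (PySem.List.pyRepeat ['C'] hp_len) : Int)
    hp_content ++ [row_hp]) []

-- ===== PORT B =====
-- one pass over the characters: measure the maximal run at the front, credit run // hp_len for A/T/G/C runs, recurse on the rest
def pvAltRow (hp_len : Int) : List Char → Int
  | [] => 0
  | ch :: t =>
      let run : Nat := 1 + (t.takeWhile (fun d => d == ch)).length
      (if ch ∈ (['A', 'T', 'G', 'C'] : List Char) then PySem.Int.floordiv (run : Int) hp_len else 0)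
        + pvAltRow hp_len (t.dropWhile (fun d => d == ch))
termination_by l => l.length
decreasing_by
  exact Nat.lt_succ_of_le (List.length_dropWhile_le _ _)

def calc_homopolymer_alt (fasta : List (String × String)) (hp_len : Int) : List Int :=
  fasta.map (fun kv => pvAltRow hp_len kv.2.toList)

-- ===== PRECONDITION & SPEC =====
-- Pre_ excludes hp_len ≤ 0, on which the pattern "A"*hp_len is empty and A's value 4*(len+1) per
-- sequence is an artefact of str.count(""); B divides run lengths by hp_len there, so it raises
-- ZeroDivisionError at hp_len = 0 and floor-divides by a negative at hp_len < 0.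
def Pre_calc_homopolymer (fasta : List (String × String)) (hp_len : Int) : Prop := 1 ≤ hp_len
instance (fasta : List (String × String)) (hp_len : Int) : Decidable (Pre_calc_homopolymer fasta hp_len) := by unfold Pre_calc_homopolymer; infer_instance
def pvWitness_calc_homopolymer : (List (String × String)) × Int := ([("k1", "AATTCN"), ("k2", "GGG")], 2)

def Spec_calc_homopolymer (fasta : List (String × String)) (hp_len : Int) (out : List Int) : Prop := out = calc_homopolymer_alt fasta hp_len
instance (fasta : List (String × String)) (hp_len : Int) (out : List Int) : Decidable (Spec_calc_homopolymer fasta hp_len out) := by unfold Spec_calc_homopolymer; infer_instance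

-- ===== CLAIM (what is proved, stated in full; the proofs are below) =====
def Claim_equal_calc_homopolymer : Prop := ∀ (fasta : List (String × String)) (hp_len : Int), Dom_calc_homopolymer fasta hp_len → Pre_calc_homopolymer fasta hp_len → Spec_calc_homopolymer fasta hp_len (calc_homopolymer fasta hp_len)

-- ===== LEMMAS AND PROOFS =====

-- A's per-row expression, named so the fold can be rewritten as a map
def pvRowA (hp_len : Int) (kv : String × String) : Int :=
  0 + (PySem.Chars.count kv.2.toList (PySem.List.pyRepeat ['A'] hp_len) : Int)
    + (PySem.Chars.count kv.2.toList (PySem.List.pyRepeat ['T'] hp_len) : Int)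
    + (PySem.Chars.count kv.2.toList (PySem.List.pyRepeat ['G'] hp_len) : Int)
    + (PySem.Chars.count kv.2.toList (PySem.List.pyRepeat ['C'] hp_len) : Int)

theorem pv_calc_eq_fold (fasta : List (String × String)) (hp_len : Int) :
    calc_homopolymer fasta hp_len = fasta.foldl (fun acc kv => acc ++ [pvRowA hp_len kv]) [] := rfl

-- accumulator of count.go is additive
theorem pv_go_acc (sub : List Char) (fuel : Nat) (l : List Char) (acc : Nat) :
    PySem.Chars.count.go sub fuel l acc = acc + PySem.Chars.count.go sub fuel l 0 := by
  induction fuel generalizing l acc with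
  | zero => simp [PySem.Chars.count.go]
  | succ f ih =>
      cases l with
      | nil => simp [PySem.Chars.count.go]
      | cons h t =>
          simp only [PySem.Chars.count.go]
          split
          · rw [ih _ (acc + 1), ih _ 1]; omega
          · rw [ih _ acc]

-- count.go does not depend on the fuel once it covers the list length (sub nonempty)
theorem pv_go_fuel (sub : List Char) (hsub : sub ≠ []) :
    ∀ (f1 : Nat), ∀ (f2 : Nat) (l : List Char) (acc : Nat), l.length ≤ f1 → l.length ≤ f2 →
      PySem.Chars.count.go sub f1 l acc = PySem.Chars.count.go sub f2 l acc := by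
  intro f1
  induction f1 with
  | zero =>
      intro f2 l acc h1 h2
      have hl : l = [] := by cases l <;> simp_all
      subst hl
      cases f2 <;> simp [PySem.Chars.count.go]
  | succ f ih =>
      intro f2 l acc h1 h2
      cases l with
      | nil => cases f2 <;> simp [PySem.Chars.count.go]
      | cons h t =>
          cases f2 with
          | zero => simp at h2
          | succ f2' =>
              simp only [PySem.Chars.count.go]
              split
              · have hs1 : 1 ≤ sub.length := by cases sub <;> simp_all
                have hlen : (List.drop sub.length (h :: t)).length ≤ f := by
                  simp only [List.length_drop, List.length_cons] at *
                  omega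
                have hlen2 : (List.drop sub.length (h :: t)).length ≤ f2' := by
                  simp only [List.length_drop, List.length_cons] at *
                  omega
                exact ih _ _ _ hlen hlen2
              · exact ih _ _ _ (by simp at h1 ⊢; omega) (by simp at h2 ⊢; omega)

-- clean wrapper for the non-empty-pattern count
def pvCnt (sub l : List Char) : Nat := PySem.Chars.count.go sub l.length l 0

theorem pvCnt_nil (sub : List Char) : pvCnt sub [] = 0 := by
  simp [pvCnt, PySem.Chars.count.go]

theorem pvCnt_cons (sub : List Char) (hsub : sub ≠ []) (h : Char) (t : List Char) :
    pvCnt sub (h :: t) =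
      if sub.isPrefixOf (h :: t) then 1 + pvCnt sub ((h :: t).drop sub.length) else pvCnt sub t := by
  have hslen : 1 ≤ sub.length := by cases sub <;> simp_all
  simp only [pvCnt, List.length_cons, PySem.Chars.count.go]
  split
  · rw [pv_go_acc]
    rw [pv_go_fuel sub hsub t.length ((h :: t).drop sub.length).length]
    · simp only [List.length_drop, List.length_cons]; omega
    · exact le_refl _
  · rfl

theorem pv_count_eq_pvCnt (s sub : List Char) (hsub : sub ≠ []) :
    PySem.Chars.count s sub = pvCnt sub s := by
  simp [PySem.Chars.count, pvCnt, List.isEmpty_iff, hsub]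

-- prefix of a homogeneous pattern against a run decomposition
theorem pv_prefix_run (K m : Nat) (c : Char) (r : List Char) (hK : 1 ≤ K)
    (hr : ∀ x, r.head? = some x → x ≠ c) :
    List.replicate K c <+: (List.replicate m c ++ r) ↔ K ≤ m := by
  constructor
  · intro hp
    by_contra hlt
    push_neg at hlt
    cases r with
    | nil =>
        have := hp.length_le
        simp at this
        omega
    | cons x r' =>
        obtain ⟨s, hs⟩ := hp
        have h1 : List.drop m (List.replicate K c ++ s) = List.replicate (K - m) c ++ s := by
          rw [List.drop_append_of_le_length (by simp; omega), List.drop_replicate]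
        have h2 : List.drop m (List.replicate m c ++ x :: r') = x :: r' := by
          rw [List.drop_append_of_le_length (by simp), List.drop_replicate]
          simp
        rw [hs, h2] at h1
        obtain ⟨K', hK'⟩ : ∃ K', K - m = K' + 1 := ⟨K - m - 1, by omega⟩
        rw [hK', List.replicate_succ, List.cons_append] at h1
        exact hr x rfl (List.cons_eq_cons.mp h1).1
  · intro hle
    refine ⟨List.replicate (m - K) c ++ r, ?_⟩
    rw [← List.append_assoc, ← List.replicate_add]
    congr 2
    omega

-- skipping a run of a different character
theorem pv_skip_run (K : Nat) (c d : Char) (hK : 1 ≤ K) (hdc : d ≠ c) :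
    ∀ (m : Nat) (r : List Char), pvCnt (List.replicate K c) (List.replicate m d ++ r) = pvCnt (List.replicate K c) r := by
  intro m
  induction m with
  | zero => simp
  | succ n ih =>
      intro r
      have hne : List.replicate K c ≠ [] := by simp; omega
      rw [List.replicate_succ, List.cons_append, pvCnt_cons _ hne]
      have hnp : ¬ (List.replicate K c).isPrefixOf (d :: (List.replicate n d ++ r)) := by
        intro hp
        rw [List.isPrefixOf_iff_prefix] at hp
        cases K with
        | zero => omega
        | succ K' =>
            rw [List.replicate_succ, List.cons_prefix_cons] at hp
            exact hdc hp.1.symm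
      rw [if_neg hnp, ih]

-- consuming a run of the pattern's own character
theorem pv_own_run (K : Nat) (c : Char) (hK : 1 ≤ K) :
    ∀ (m : Nat) (r : List Char), (∀ x, r.head? = some x → x ≠ c) →
      pvCnt (List.replicate K c) (List.replicate m c ++ r) = m / K + pvCnt (List.replicate K c) r := by
  intro m
  induction m using Nat.strong_induction_on with
  | _ m ih =>
      intro r hr
      have hne : List.replicate K c ≠ [] := by simp; omega
      by_cases hKm : K ≤ m
      · obtain ⟨m', rfl⟩ : ∃ m', m = m' + 1 := ⟨m - 1, by omega⟩
        rw [List.replicate_succ, List.cons_append, pvCnt_cons _ hne]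
        have hp : (List.replicate K c).isPrefixOf (c :: (List.replicate m' c ++ r)) := by
          rw [List.isPrefixOf_iff_prefix, ← List.cons_append, ← List.replicate_succ]
          exact (pv_prefix_run K (m' + 1) c r hK hr).mpr hKm
        rw [if_pos hp]
        have hdrop : (c :: (List.replicate m' c ++ r)).drop (List.replicate K c).length
            = List.replicate (m' + 1 - K) c ++ r := by
          rw [← List.cons_append, ← List.replicate_succ, List.length_replicate,
            List.drop_append_of_le_length (by simp; omega), List.drop_replicate]
        rw [hdrop, ih (m' + 1 - K) (by omega) r hr]
        rw [Nat.div_eq_sub_div (by omega) hKm]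
        omega
      · push_neg at hKm
        cases m with
        | zero => simp [Nat.div_eq_of_lt hKm]
        | succ m' =>
            rw [List.replicate_succ, List.cons_append, pvCnt_cons _ hne]
            have hnp : ¬ (List.replicate K c).isPrefixOf (c :: (List.replicate m' c ++ r)) := by
              rw [List.isPrefixOf_iff_prefix, ← List.cons_append, ← List.replicate_succ]
              intro hp
              exact absurd ((pv_prefix_run K (m' + 1) c r hK hr).mp hp) (by omega)
            rw [if_neg hnp, ih m' (by omega) r hr]
            rw [Nat.div_eq_of_lt (by omega), Nat.div_eq_of_lt (by omega)]

-- one run, one pattern character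
theorem pv_per_run (K m : Nat) (c ch : Char) (r : List Char) (hK : 1 ≤ K)
    (hr : ∀ x, r.head? = some x → x ≠ ch) :
    pvCnt (List.replicate K c) (List.replicate m ch ++ r)
      = (if c = ch then m / K else 0) + pvCnt (List.replicate K c) r := by
  by_cases hc : c = ch
  · subst hc
    rw [if_pos rfl]
    exact pv_own_run K c hK m r hr
  · rw [if_neg hc, pv_skip_run K c ch hK (fun h => hc h.symm)]
    omega

-- floor division of a natural number by a positive int is Nat division
theorem pv_floordiv_nat (m : Nat) (k : Int) (hk : 1 ≤ k) :
    PySem.Int.floordiv (m : Int) k = ((m / k.toNat : Nat) : Int) := by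
  unfold PySem.Int.floordiv
  rw [Int.ofNat_fdiv]
  have hkk : ((k.toNat : Nat) : Int) = k := by omega
  rw [hkk]

-- run decomposition of a nonempty list
theorem pv_run_decomp (ch : Char) (t : List Char) :
    ch :: t = List.replicate (1 + (t.takeWhile (fun d => d == ch)).length) ch ++ t.dropWhile (fun d => d == ch) := by
  have htake : t.takeWhile (fun d => d == ch) = List.replicate (t.takeWhile (fun d => d == ch)).length ch := by
    rw [List.eq_replicate_iff]
    refine ⟨rfl, fun b hb => ?_⟩
    have := List.mem_takeWhile_imp hb
    simpa using this
  conv_lhs => rw [← List.takeWhile_append_dropWhile (p := fun d => d == ch) (l := t)]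
  rw [Nat.add_comm, List.replicate_succ, List.cons_append]
  congr 1
  conv_lhs => rw [htake]

theorem pv_head_dropWhile (ch : Char) (t : List Char) :
    ∀ x, (t.dropWhile (fun d => d == ch)).head? = some x → x ≠ ch := by
  induction t with
  | nil => simp
  | cons h t ih =>
      intro x hx
      rw [List.dropWhile_cons] at hx
      by_cases hh : (h == ch) = true
      · rw [if_pos hh] at hx
        exact ih x hx
      · rw [if_neg hh] at hx
        simp only [List.head?_cons, Option.some.injEq] at hx
        subst hx
        simpa using hh

-- main per-sequence lemma: the four greedy counts sum to the run-length pass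
theorem pv_main (k : Int) (hk : 1 ≤ k) :
    ∀ (n : Nat) (l : List Char), l.length ≤ n →
      ((pvCnt (List.replicate k.toNat 'A') l : Int) + (pvCnt (List.replicate k.toNat 'T') l : Int)
        + (pvCnt (List.replicate k.toNat 'G') l : Int) + (pvCnt (List.replicate k.toNat 'C') l : Int))
      = pvAltRow k l := by
  have hK : 1 ≤ k.toNat := by omega
  intro n
  induction n with
  | zero =>
      intro l hl
      have : l = [] := by cases l <;> simp_all
      subst this
      simp [pvCnt_nil, pvAltRow]
  | succ n ih =>
      intro l hl
      cases l with
      | nil => simp [pvCnt_nil, pvAltRow]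
      | cons ch t =>
          set m := 1 + (t.takeWhile (fun d => d == ch)).length with hm
          set r := t.dropWhile (fun d => d == ch) with hrdef
          have hdec : ch :: t = List.replicate m ch ++ r := pv_run_decomp ch t
          have hr : ∀ x, r.head? = some x → x ≠ ch := pv_head_dropWhile ch t
          have hrlen : r.length ≤ n := by
            have hle : r.length ≤ t.length := by
              rw [hrdef]
              exact (List.dropWhile_suffix (l := t) (fun d => d == ch)).length_le
            simp only [List.length_cons] at hl
            omega
          have ihr := ih r hrlen
          have halt : pvAltRow k (ch :: t)
              = (if ch ∈ (['A', 'T', 'G', 'C'] : List Char) then PySem.Int.floordiv (m : Int) k else 0)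
                + pvAltRow k r := by
            simp only [pvAltRow]
            rw [← hm, ← hrdef]
          rw [hdec] at halt ⊢
          rw [pv_per_run _ m 'A' ch r hK hr, pv_per_run _ m 'T' ch r hK hr,
            pv_per_run _ m 'G' ch r hK hr, pv_per_run _ m 'C' ch r hK hr]
          rw [halt, ← ihr, pv_floordiv_nat m k hk]
          by_cases hA : ch = 'A'
          · subst hA; push_cast; simp; ring
          by_cases hT : ch = 'T'
          · subst hT; push_cast; simp [hA]; ring
          by_cases hG : ch = 'G'
          · subst hG; push_cast; simp [hA, hT]; ring
          by_cases hC : ch = 'C'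
          · subst hC; push_cast; simp [hA, hT, hG]; ring
          · have hA' : ¬(('A' : Char) = ch) := fun h => hA h.symm
            have hT' : ¬(('T' : Char) = ch) := fun h => hT h.symm
            have hG' : ¬(('G' : Char) = ch) := fun h => hG h.symm
            have hC' : ¬(('C' : Char) = ch) := fun h => hC h.symm
            push_cast
            simp [hA, hT, hG, hC, hA', hT', hG', hC']

-- ===== VERDICT =====
theorem calc_homopolymer_spec : Claim_equal_calc_homopolymer := by
  intro fasta hp_len _ hpre
  unfold Spec_calc_homopolymer calc_homopolymer_alt
  have hk : 1 ≤ hp_len := hpre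
  rw [pv_calc_eq_fold, PySem.List.foldl_append_singleton_eq_map, List.nil_append]
  refine List.map_congr_left (fun kv _ => ?_)
  unfold pvRowA
  have hne : ∀ c : Char, ([c] : List Char) ≠ [] := by intro c; simp
  rw [PySem.List.pyRepeat_singleton, PySem.List.pyRepeat_singleton,
    PySem.List.pyRepeat_singleton, PySem.List.pyRepeat_singleton]
  have hKne : (List.replicate hp_len.toNat 'A' ≠ []) ∧ (List.replicate hp_len.toNat 'T' ≠ [])
      ∧ (List.replicate hp_len.toNat 'G' ≠ []) ∧ (List.replicate hp_len.toNat 'C' ≠ []) := by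
    refine ⟨?_, ?_, ?_, ?_⟩ <;> (simp; omega)
  rw [pv_count_eq_pvCnt _ _ hKne.1, pv_count_eq_pvCnt _ _ hKne.2.1,
    pv_count_eq_pvCnt _ _ hKne.2.2.1, pv_count_eq_pvCnt _ _ hKne.2.2.2]
  rw [zero_add]
  exact pv_main hp_len hk kv.2.toList.length kv.2.toList (le_refl _)
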